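-- pv_equiv track=rewrite | github.com/jurayev/data-structures-algorithms-solutions | 1770-maximum-score-from-performing-multiplication-operations/1770-maximum-score-from-performing-multiplication-operations.py | maximumScore
-- ===== SOURCE A (Python) =====
-- from typing import List
--
-- def maximumScore(nums: List[int], multipliers: List[int]) -> int:
--     n, m = len(nums), len(multipliers)
--     dp = [[0] * (m + 1) for _ in range(m + 1)]
--
--     for i in range(m - 1, -1, -1):
--         for left in range(i, -1, -1):
--             mult = multipliers[i]
--             right = n - 1 - (i - left)
--             dp[i][left] = max(mult * nums[left] + dp[i + 1][left + 1],
--                               mult * nums[right] + dp[i + 1][left])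
--     return dp[0][0]
-- ===== SOURCE B (Python) =====
-- from typing import List
--
-- def maximumScore(nums: List[int], multipliers: List[int]) -> int:
--     n, m = len(nums), len(multipliers)
--     memo = [[None] * (m + 1) for _ in range(m)]
--
--     def solve(i, left):
--         if i == m:
--             return 0
--         row = memo[i]
--         r = row[left]
--         if r is None:
--             mult = multipliers[i]
--             right = n - 1 - (i - left)
--             r = max(mult * nums[left] + solve(i + 1, left + 1),
--                     mult * nums[right] + solve(i + 1, left))
--             row[left] = r
--         return r
--
--     return solve(0, 0)
-- ===== Notes on version B (the rewrite author's own statement) =====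
-- stated objective: alternative
-- what changed: Replaces A's backward two-loop tabulation over an (m+1)x(m+1) table with top-down memoized recursion on the state (i, left) (a solve helper memoized in a per-state table), the naturally recursive formulation of the same recurrence.
import Mathlib
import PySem

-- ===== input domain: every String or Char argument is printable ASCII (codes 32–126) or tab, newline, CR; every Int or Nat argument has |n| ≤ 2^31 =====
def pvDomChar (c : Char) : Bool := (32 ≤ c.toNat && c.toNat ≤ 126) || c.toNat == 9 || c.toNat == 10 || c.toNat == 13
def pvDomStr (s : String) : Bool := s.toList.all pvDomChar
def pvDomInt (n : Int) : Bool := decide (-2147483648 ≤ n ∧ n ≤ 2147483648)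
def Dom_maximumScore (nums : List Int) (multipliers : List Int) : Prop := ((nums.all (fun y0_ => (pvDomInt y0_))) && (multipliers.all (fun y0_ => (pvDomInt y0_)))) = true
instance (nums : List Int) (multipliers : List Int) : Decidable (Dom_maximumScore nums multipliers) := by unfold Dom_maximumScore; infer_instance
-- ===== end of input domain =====

-- B replaces A's backward two-loop tabulation over a 2-D table by top-down memoized
-- recursion on the state (i, left); the memo cache is value-transparent, so B's Lean
-- port is the plain recursion on fuel m - i.

-- ===== PORT A =====
-- dp[i][left] read (both indices are nonnegative and in range at every use; .getD only totalizes)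
def pvGet2 (dp : List (List Int)) (i j : Int) : Int :=
  (PySem.List.pyGet? ((PySem.List.pyGet? dp i).getD []) j).getD 0

-- dp[i][left] = v write (both indices nonnegative and in range at every use, so .toNat is exact)
def pvSet2 (dp : List (List Int)) (i j : Int) (v : Int) : List (List Int) :=
  dp.set i.toNat ((dp.getD i.toNat []).set j.toNat v)

-- the body of A's inner loop: dp[i][left] = max(mult*nums[left] + dp[i+1][left+1], mult*nums[right] + dp[i+1][left])
def pvStep (nums multipliers : List Int) (dp : List (List Int)) (i left : Int) : List (List Int) :=
  let n : Int := nums.length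
  let mult := (PySem.List.pyGet? multipliers i).getD 0
  let right := n - 1 - (i - left)
  pvSet2 dp i left
    (max (mult * (PySem.List.pyGet? nums left).getD 0 + pvGet2 dp (i + 1) (left + 1))
         (mult * (PySem.List.pyGet? nums right).getD 0 + pvGet2 dp (i + 1) left))

def maximumScore (nums : List Int) (multipliers : List Int) : Int :=
  let m : Int := multipliers.length
  let dp0 : List (List Int) := List.replicate (m.toNat + 1) (List.replicate (m.toNat + 1) 0)
  let dp := (PySem.List.pyRange (m - 1) (-1) (-1)).foldl (fun dp i =>
    (PySem.List.pyRange i (-1) (-1)).foldl (fun dp left => pvStep nums multipliers dp i left) dp) dp0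
  pvGet2 dp 0 0

-- ===== PORT B =====
-- solve(i, left) from Source B; fuel = m - i (the recursion stops at i == m), so i = m - fuel.
def pvSolve (nums multipliers : List Int) : Nat → Int → Int
  | 0, _ => 0
  | k + 1, left =>
    let n : Int := nums.length
    let m : Int := multipliers.length
    let i : Int := m - (k + 1)
    let mult := (PySem.List.pyGet? multipliers i).getD 0
    let right := n - 1 - (i - left)
    max (mult * (PySem.List.pyGet? nums left).getD 0 + pvSolve nums multipliers k (left + 1))
        (mult * (PySem.List.pyGet? nums right).getD 0 + pvSolve nums multipliers k left)

def maximumScore_alt (nums : List Int) (multipliers : List Int) : Int :=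
  pvSolve nums multipliers multipliers.length 0

-- ===== PRECONDITION & SPEC =====
-- Pre_ excludes exactly the inputs where A raises IndexError: whenever
-- len(multipliers) > len(nums), A's very first access nums[left] (left = m-1) is out of range.
def Pre_maximumScore (nums : List Int) (multipliers : List Int) : Prop :=
  multipliers.length ≤ nums.length
instance (nums : List Int) (multipliers : List Int) : Decidable (Pre_maximumScore nums multipliers) := by
  unfold Pre_maximumScore; infer_instance

def pvWitness_maximumScore : List Int × List Int := ([1, 2], [3])

def Spec_maximumScore (nums : List Int) (multipliers : List Int) (out : Int) : Prop := out = maximumScore_alt nums multipliers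
instance (nums : List Int) (multipliers : List Int) (out : Int) : Decidable (Spec_maximumScore nums multipliers out) := by unfold Spec_maximumScore; infer_instance

-- ===== CLAIM (what is proved, stated in full; the proofs are below) =====
def Claim_equal_maximumScore : Prop := ∀ (nums : List Int) (multipliers : List Int), Dom_maximumScore nums multipliers → Pre_maximumScore nums multipliers → Spec_maximumScore nums multipliers (maximumScore nums multipliers)

-- ===== LEMMAS AND PROOFS =====

lemma pvGet2_nat (dp : List (List Int)) (j l : Nat) :
    pvGet2 dp (j : Int) (l : Int) = ((dp.getD j []).getD l 0) := by
  simp [pvGet2, List.getD]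

lemma pvSet2_nat (dp : List (List Int)) (j l : Nat) (v : Int) :
    pvSet2 dp (j : Int) (l : Int) v = dp.set j ((dp.getD j []).set l v) := by
  simp [pvSet2]

lemma pvGet2_set2_ne (dp : List (List Int)) (j l j' l' : Nat) (v : Int)
    (h : j' ≠ j ∨ l' ≠ l) :
    pvGet2 (dp.set j ((dp.getD j []).set l v)) (j' : Int) (l' : Int) =
      pvGet2 dp (j' : Int) (l' : Int) := by
  rw [pvGet2_nat, pvGet2_nat]
  simp only [List.getD]
  rcases h with h | h
  · rw [List.getElem?_set_ne (fun he => h he.symm)]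
  · rw [List.getElem?_set]
    by_cases hj : j = j'
    · subst hj
      by_cases hlen : j < dp.length
      · simp [hlen, List.getElem?_set_ne (fun he => h he.symm)]
      · simp [hlen]
    · simp [hj]

lemma pvGet2_set2_self (dp : List (List Int)) (j l : Nat) (v : Int)
    (hj : j < dp.length) (hl : l < (dp.getD j []).length) :
    pvGet2 (dp.set j ((dp.getD j []).set l v)) (j : Int) (l : Int) = v := by
  rw [pvGet2_nat]
  simp only [List.getD]
  rw [List.getElem?_set_self (by simpa using hj)]
  simp only [Option.getD_some]
  rw [List.getElem?_set_self (by simpa [List.getD] using hl)]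
  rfl

-- dimensions of the table
def pvDims (m : Nat) (dp : List (List Int)) : Prop :=
  dp.length = m + 1 ∧ ∀ j : Nat, j < m + 1 → (dp.getD j []).length = m + 1

lemma pvDims_set2 (m : Nat) (dp : List (List Int)) (j l : Nat) (v : Int)
    (h : pvDims m dp) :
    pvDims m (dp.set j ((dp.getD j []).set l v)) := by
  obtain ⟨h1, h2⟩ := h
  refine ⟨by simpa using h1, ?_⟩
  intro j2 hj2
  simp only [List.getD]
  rw [List.getElem?_set]
  by_cases e : j = j2
  · subst e
    have hjlt : j < dp.length := by omega
    simp only [hjlt, if_pos]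
    simp only [Option.getD_some, List.length_set]
    have := h2 j hj2
    simpa [List.getD] using this
  · rw [if_neg e]
    have := h2 j2 hj2
    simpa [List.getD] using this

-- the triangle invariant after the outer loop has processed rows m-1, …, t
def pvGood (nums ms : List Int) (t : Nat) (dp : List (List Int)) : Prop :=
  pvDims ms.length dp ∧
  ∀ j l : Nat, t ≤ j → j ≤ ms.length → l ≤ j →
    pvGet2 dp (j : Int) (l : Int) = pvSolve nums ms (ms.length - j) l

-- invariant inside the inner loop on row i: columns left ∈ [cut, i] already written
def pvInner (nums ms : List Int) (i cut : Nat) (dp : List (List Int)) : Prop :=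
  pvDims ms.length dp ∧
  (∀ j l : Nat, i + 1 ≤ j → j ≤ ms.length → l ≤ j →
    pvGet2 dp (j : Int) (l : Int) = pvSolve nums ms (ms.length - j) l) ∧
  (∀ l : Nat, cut ≤ l → l ≤ i →
    pvGet2 dp (i : Int) (l : Int) = pvSolve nums ms (ms.length - i) l)

lemma pvInner_step (nums ms : List Int) (i l : Nat) (dp : List (List Int))
    (hi : i < ms.length) (hl : l ≤ i) (h : pvInner nums ms i (l + 1) dp) :
    pvInner nums ms i l (pvStep nums ms dp (i : Int) (l : Int)) := by
  obtain ⟨hdims, hup, hrowdone⟩ := h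
  have hjlt : i < dp.length := by have := hdims.1; omega
  have hrl : (dp.getD i []).length = ms.length + 1 := hdims.2 i (by omega)
  have hllt : l < (dp.getD i []).length := by omega
  have heq : pvStep nums ms dp (i : Int) (l : Int) =
      dp.set i ((dp.getD i []).set l (max
        ((PySem.List.pyGet? ms (i : Int)).getD 0 * (PySem.List.pyGet? nums (l : Int)).getD 0 +
          pvGet2 dp ((i : Int) + 1) ((l : Int) + 1))
        ((PySem.List.pyGet? ms (i : Int)).getD 0 *
          (PySem.List.pyGet? nums ((nums.length : Int) - 1 - ((i : Int) - (l : Int)))).getD 0 +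
          pvGet2 dp ((i : Int) + 1) (l : Int)))) := by
    simp only [pvStep]
    rw [pvSet2_nat]
  rw [heq]
  refine ⟨pvDims_set2 _ _ _ _ _ hdims, ?_, ?_⟩
  · intro j l2 h1 h2 h3
    rw [pvGet2_set2_ne _ _ _ _ _ _ (Or.inl (by omega))]
    exact hup j l2 h1 h2 h3
  · intro l2 h1 h2
    by_cases hc : l2 = l
    · subst hc
      rw [pvGet2_set2_self _ _ _ _ hjlt hllt]
      have hup1 : pvGet2 dp ((i : Int) + 1) ((l2 : Int) + 1) =
          pvSolve nums ms (ms.length - (i + 1)) ((l2 : Int) + 1) := by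
        have := hup (i + 1) (l2 + 1) (le_refl _) (by omega) (by omega)
        push_cast at this; exact this
      have hup2 : pvGet2 dp ((i : Int) + 1) (l2 : Int) =
          pvSolve nums ms (ms.length - (i + 1)) (l2 : Int) := by
        have := hup (i + 1) l2 (le_refl _) (by omega) (by omega)
        push_cast at this; exact this
      have hfuel : ms.length - i = (ms.length - (i + 1)) + 1 := by omega
      rw [hfuel, pvSolve, hup1, hup2]
      have hidx : (ms.length : Int) - ((((ms.length - (i + 1)) : Nat) : Int) + 1) = (i : Int) := by
        omega
      rw [hidx]
    · rw [pvGet2_set2_ne _ _ _ _ _ _ (Or.inr hc)]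
      exact hrowdone l2 (by omega) h2

lemma pvInner_fold (nums ms : List Int) (i : Nat) (hi : i < ms.length) :
    ∀ (cut : Nat), cut ≤ i + 1 → ∀ dp, pvInner nums ms i cut dp →
    pvInner nums ms i 0 ((PySem.List.pyRange ((cut : Int) - 1) (-1) (-1)).foldl
      (fun dp left => pvStep nums ms dp (i : Int) left) dp) := by
  intro cut
  induction cut with
  | zero =>
    intro _ dp h
    rw [PySem.List.pyRange_neg_one_eq_nil (by norm_num)]
    simpa using h
  | succ c ih =>
    intro hc dp h
    have hcons : PySem.List.pyRange ((((c : Nat) + 1 : Nat) : Int) - 1) (-1) (-1) =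
        (c : Int) :: PySem.List.pyRange ((c : Int) - 1) (-1) (-1) := by
      push_cast
      rw [show ((c : Int) + 1 - 1) = (c : Int) by ring]
      exact PySem.List.pyRange_neg_one_cons (by omega)
    rw [hcons, List.foldl_cons]
    exact ih (by omega) _ (pvInner_step nums ms i c dp hi (by omega) h)

lemma pvOuter_fold (nums ms : List Int) :
    ∀ (t : Nat), t ≤ ms.length → ∀ dp, pvGood nums ms t dp →
    pvGood nums ms 0 ((PySem.List.pyRange ((t : Int) - 1) (-1) (-1)).foldl
      (fun dp i => (PySem.List.pyRange i (-1) (-1)).foldl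
        (fun dp left => pvStep nums ms dp i left) dp) dp) := by
  intro t
  induction t with
  | zero =>
    intro _ dp h
    rw [PySem.List.pyRange_neg_one_eq_nil (by norm_num)]
    simpa using h
  | succ c ih =>
    intro hc dp h
    have hcons : PySem.List.pyRange ((((c : Nat) + 1 : Nat) : Int) - 1) (-1) (-1) =
        (c : Int) :: PySem.List.pyRange ((c : Int) - 1) (-1) (-1) := by
      push_cast
      rw [show ((c : Int) + 1 - 1) = (c : Int) by ring]
      exact PySem.List.pyRange_neg_one_cons (by omega)
    rw [hcons, List.foldl_cons]
    apply ih (by omega)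
    -- row c gets filled by the inner loop
    obtain ⟨hdims, hval⟩ := h
    have hinner0 : pvInner nums ms c (c + 1) dp :=
      ⟨hdims, fun j l h1 h2 h3 => hval j l h1 h2 h3, fun l h1 h2 => absurd (le_trans h1 h2) (by omega)⟩
    have hres := pvInner_fold nums ms c (by omega) (c + 1) (le_refl _) dp hinner0
    rw [show (((c : Nat) + 1 : Nat) : Int) - 1 = (c : Int) by push_cast; ring] at hres
    obtain ⟨hd, hu, hr⟩ := hres
    refine ⟨hd, ?_⟩
    intro j l h1 h2 h3
    by_cases hj : j = c
    · subst hj; exact hr l (by omega) h3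
    · exact hu j l (by omega) h2 h3

lemma pvGood_init (nums ms : List Int) :
    pvGood nums ms ms.length
      (List.replicate (((ms.length : Int)).toNat + 1) (List.replicate (((ms.length : Int)).toNat + 1) 0)) := by
  constructor
  · constructor
    · simp
    · intro j hj
      simp only [Int.toNat_natCast] at *
      simp [List.getD, hj]
  · intro j l h1 h2 h3
    have hj : j = ms.length := le_antisymm h2 h1
    subst hj
    rw [pvGet2_nat]
    simp only [Nat.sub_self]
    simp [List.getD, pvSolve, h3]

-- ===== VERDICT (by name: the statement is the Claim_ definition above) =====
theorem maximumScore_spec : Claim_equal_maximumScore := by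
  intro nums ms _ _
  unfold Spec_maximumScore maximumScore maximumScore_alt
  simp only []
  have h := pvOuter_fold nums ms ms.length (le_refl _) _ (pvGood_init nums ms)
  obtain ⟨_, hval⟩ := h
  have := hval 0 0 (by omega) (by omega) (by omega)
  simpa using this
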